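-- pv_equiv track=rewrite | github.com/IEJYoum/pre-ohsu-code | OutlinerDemo.py | profToComp
-- ===== SOURCE A (Python) =====
-- def profToComp(prof):
--     nums = []
--     counts = []
--     for dist in prof:
--         dCount = dist[1]
--         for i in range(2,len(dist)-1,2):
--             distN = dist[i]
--             if distN not in nums:
--                 nums.append(distN)
--                 counts.append(dCount)
--             else:
--                 counts[nums.index(distN)] += dCount
--     return([nums,counts])
-- ===== SOURCE B (Python) =====
-- def profToComp(prof):
--     # staged pipeline: flatten to a (value, count) event stream, dedupe the
--     # values preserving first-seen order, then a summation pass per value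
--     events = [(dist[i], dist[1]) for dist in prof for i in range(2, len(dist) - 1, 2)]
--     nums = list(dict.fromkeys(k for k, _ in events))
--     counts = [sum(c for k, c in events if k == key) for key in nums]
--     return [nums, counts]
-- ===== Notes on version B (the rewrite author's own statement) =====
-- stated objective: alternative
-- what changed: Replaces A's online accumulation (branching append-or-index-update on two parallel lists) by a staged pipeline: flatten all rows to one (value,count) event list, dedupe values in first-seen order with dict.fromkeys, then a separate summation pass per distinct value.
import Mathlib
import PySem

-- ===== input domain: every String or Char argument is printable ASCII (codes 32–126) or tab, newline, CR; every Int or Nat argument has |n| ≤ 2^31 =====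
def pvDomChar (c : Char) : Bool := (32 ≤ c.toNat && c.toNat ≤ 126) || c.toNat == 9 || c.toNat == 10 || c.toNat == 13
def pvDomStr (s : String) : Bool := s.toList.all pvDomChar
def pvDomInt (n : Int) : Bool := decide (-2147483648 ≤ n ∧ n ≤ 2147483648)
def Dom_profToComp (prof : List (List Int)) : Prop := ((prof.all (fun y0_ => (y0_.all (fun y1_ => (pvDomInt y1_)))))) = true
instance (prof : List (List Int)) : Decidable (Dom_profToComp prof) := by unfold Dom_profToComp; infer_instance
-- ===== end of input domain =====

-- B replaces A's online accumulation (append-or-index-update on two parallel lists)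
-- by a staged pipeline: flatten to a (value, count) event stream, dedupe the values
-- in first-seen order, then one summation pass per distinct value (objective: alternative).

-- ===== PORT A =====
-- dist[1] is ported with pyGetD: exact under Pre_profToComp (2 ≤ dist.length);
-- dist[i] for i in range(2, len(dist)-1, 2) is always in range, so pyGetD is exact there.
def profToComp (prof : List (List Int)) : List (List Int) :=
  let st := prof.foldl (fun (st : List Int × List Int) dist =>
    let dCount := PySem.List.pyGetD dist 1 0
    (PySem.List.pyRange 2 ((dist.length : Int) - 1) 2).foldl (fun st i =>
      let distN := PySem.List.pyGetD dist i 0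
      if distN ∉ st.1 then
        (st.1 ++ [distN], st.2 ++ [dCount])
      else
        let j := (PySem.List.index? st.1 distN).getD 0
        (st.1, st.2.set j (st.2.getD j 0 + dCount))) st) ([], [])
  [st.1, st.2]

-- ===== PORT B =====
-- the flattened event comprehension of Source B
def pvEvents (prof : List (List Int)) : List (Int × Int) :=
  prof.flatMap (fun dist =>
    (PySem.List.pyRange 2 ((dist.length : Int) - 1) 2).map (fun i =>
      (PySem.List.pyGetD dist i 0, PySem.List.pyGetD dist 1 0)))

-- sum(c for k, c in events if k == key)
def pvSum (es : List (Int × Int)) (key : Int) : Int :=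
  (es.filter (fun p => p.1 == key)).foldl (fun s p => s + p.2) 0

-- list(dict.fromkeys(...)) is PySem.List.dedup (first occurrences, in order)
def profToComp_alt (prof : List (List Int)) : List (List Int) :=
  let events := pvEvents prof
  let nums := PySem.List.dedup (events.map Prod.fst)
  let counts := nums.map (fun key => pvSum events key)
  [nums, counts]

-- ===== PRECONDITION & SPEC =====
-- A raises IndexError on dist[1] for any row of length < 2; Pre_ excludes exactly those.
def Pre_profToComp (prof : List (List Int)) : Prop := ∀ dist ∈ prof, 2 ≤ dist.length
instance (prof : List (List Int)) : Decidable (Pre_profToComp prof) := by unfold Pre_profToComp; infer_instance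
def pvWitness_profToComp : List (List Int) := [[0, 2, 5, 9, 7], [1, 3, 5, 9, 0]]

def Spec_profToComp (prof : List (List Int)) (out : List (List Int)) : Prop := out = profToComp_alt prof
instance (prof : List (List Int)) (out : List (List Int)) : Decidable (Spec_profToComp prof out) := by unfold Spec_profToComp; infer_instance

-- ===== CLAIM (what is proved, stated in full; the proofs are below) =====
def Claim_equal_profToComp : Prop := ∀ (prof : List (List Int)), Dom_profToComp prof → Pre_profToComp prof → Spec_profToComp prof (profToComp prof)

-- ===== LEMMAS AND PROOFS =====

-- A's loop body, as a step on one (value, count) event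
def pvStep (st : List Int × List Int) (e : Int × Int) : List Int × List Int :=
  if e.1 ∉ st.1 then
    (st.1 ++ [e.1], st.2 ++ [e.2])
  else
    let j := (PySem.List.index? st.1 e.1).getD 0
    (st.1, st.2.set j (st.2.getD j 0 + e.2))

theorem pv_foldA_eq (prof : List (List Int)) : ∀ (st : List Int × List Int),
    prof.foldl (fun (st : List Int × List Int) dist =>
      let dCount := PySem.List.pyGetD dist 1 0
      (PySem.List.pyRange 2 ((dist.length : Int) - 1) 2).foldl (fun st i =>
        let distN := PySem.List.pyGetD dist i 0
        if distN ∉ st.1 then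
          (st.1 ++ [distN], st.2 ++ [dCount])
        else
          let j := (PySem.List.index? st.1 distN).getD 0
          (st.1, st.2.set j (st.2.getD j 0 + dCount))) st) st
    = (pvEvents prof).foldl pvStep st := by
  induction prof with
  | nil => intro st; rfl
  | cons dist t ih =>
    intro st
    simp only [List.foldl_cons, pvEvents, List.flatMap_cons, List.foldl_append, List.foldl_map]
    rw [ih]
    rfl

theorem pv_index_getD (nums : List Int) (k : Int) (hk : k ∈ nums) :
    (PySem.List.index? nums k).getD 0 = nums.idxOf k := by
  induction nums with
  | nil => simp at hk
  | cons x ns ih =>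
    by_cases hx : x = k
    · subst hx
      rw [PySem.List.index?_cons_self, List.idxOf_cons_self]
      rfl
    · have hk' : k ∈ ns := by
        rcases List.mem_cons.mp hk with h | h
        · exact absurd h.symm hx
        · exact h
      obtain ⟨m, hm⟩ := Option.isSome_iff_exists.mp ((PySem.List.index?_isSome_iff ns k).mpr hk')
      rw [PySem.List.index?_cons_of_ne _ hx, List.idxOf_cons_ne _ hx, hm,
        Option.map_some, Option.getD_some, ← ih hk', hm, Option.getD_some]

theorem pv_dedup_snoc (ks : List Int) (k : Int) :
    PySem.List.dedup (ks ++ [k]) =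
      if k ∈ PySem.List.dedup ks then PySem.List.dedup ks else PySem.List.dedup ks ++ [k] := by
  simp only [PySem.List.dedup_eq_ofList, PySem.Set.ofList_eq_foldl, List.foldl_append,
    List.foldl_cons, List.foldl_nil]
  simp [PySem.Set.add, PySem.Set.contains]

theorem pv_sum_snoc (es : List (Int × Int)) (e : Int × Int) (key : Int) :
    pvSum (es ++ [e]) key = if e.1 = key then pvSum es key + e.2 else pvSum es key := by
  simp only [pvSum, List.filter_append, List.foldl_append]
  by_cases h : e.1 = key <;> simp [h]

theorem pv_sum_zero (es : List (Int × Int)) (key : Int) (h : key ∉ es.map Prod.fst) :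
    pvSum es key = 0 := by
  have : es.filter (fun p => p.1 == key) = [] := by
    rw [List.filter_eq_nil_iff]
    intro p hp hpk
    exact h (List.mem_map.mpr ⟨p, hp, by simpa using hpk⟩)
  simp [pvSum, this]

theorem pv_map_getD_idxOf (f : Int → Int) (ns : List Int) (k : Int) (hk : k ∈ ns) :
    (ns.map f).getD (ns.idxOf k) 0 = f k := by
  induction ns with
  | nil => simp at hk
  | cons x t ih =>
    by_cases hx : x = k
    · subst hx; simp [List.idxOf_cons_self]
    · have hk' : k ∈ t := by
        rcases List.mem_cons.mp hk with h | h
        · exact absurd h.symm hx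
        · exact h
      simp only [List.map_cons, List.idxOf_cons_ne _ hx, List.getD_cons_succ]
      exact ih hk'

theorem pv_map_set_idxOf (f : Int → Int) (ns : List Int) (k v : Int)
    (hnd : ns.Nodup) (hk : k ∈ ns) :
    (ns.map f).set (ns.idxOf k) v = ns.map (fun x => if x = k then v else f x) := by
  induction ns with
  | nil => simp at hk
  | cons x t ih =>
    by_cases hx : x = k
    · subst hx
      have hxt : x ∉ t := (List.nodup_cons.mp hnd).1
      simp only [List.map_cons, List.idxOf_cons_self, List.set_cons_zero]
      congr 1
      exact (List.map_congr_left (fun a ha => by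
        have : a ≠ x := fun h => hxt (h ▸ ha)
        simp [this])).symm
    · have hk' : k ∈ t := by
        rcases List.mem_cons.mp hk with h | h
        · exact absurd h.symm hx
        · exact h
      simp only [List.map_cons, List.idxOf_cons_ne _ hx, List.set_cons_succ]
      rw [ih (List.nodup_cons.mp hnd).2 hk']
      simp [hx]

theorem pv_main (es : List (Int × Int)) :
    es.foldl pvStep ([], []) =
      (PySem.List.dedup (es.map Prod.fst),
       (PySem.List.dedup (es.map Prod.fst)).map (fun key => pvSum es key)) := by
  induction es using List.reverseRecOn with
  | nil => rfl
  | append_singleton es e ih =>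
    obtain ⟨k, c⟩ := e
    rw [List.foldl_append, List.foldl_cons, List.foldl_nil, ih]
    have hmap : (es ++ [(k, c)]).map Prod.fst = es.map Prod.fst ++ [k] := by simp
    rw [hmap, pv_dedup_snoc]
    set ks := es.map Prod.fst with hks
    by_cases hk : k ∈ PySem.List.dedup ks
    · have hkks : k ∈ ks := (PySem.List.mem_dedup _ _).mp hk
      have hnd : (PySem.List.dedup ks).Nodup := PySem.List.nodup_dedup ks
      simp only [pvStep, hk, not_true_eq_false, if_false]
      rw [pv_index_getD _ _ hk, pv_map_getD_idxOf, pv_map_set_idxOf _ _ _ _ hnd hk]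
      · refine Prod.ext rfl ?_
        refine List.map_congr_left (fun x hx => ?_)
        rw [pv_sum_snoc]
        by_cases hxk : x = k
        · subst hxk; simp
        · have : k ≠ x := fun h => hxk h.symm
          simp [this, hxk]
      · exact hk
    · have hkks : k ∉ ks := fun h => hk ((PySem.List.mem_dedup _ _).mpr h)
      simp only [pvStep, hk, not_false_eq_true, if_true]
      refine Prod.ext rfl ?_
      show _ ++ [c] = (PySem.List.dedup ks ++ [k]).map (fun key => pvSum (es ++ [(k, c)]) key)
      rw [List.map_append]
      congr 1
      · refine List.map_congr_left (fun x hx => ?_)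
        rw [pv_sum_snoc]
        have : k ≠ x := fun h => hk (h ▸ hx)
        simp [this]
      · simp only [List.map_cons, List.map_nil]
        rw [pv_sum_snoc]
        simp [pv_sum_zero es k hkks]

-- ===== VERDICT (by name: the statement is the Claim_ definition above) =====
theorem profToComp_spec : Claim_equal_profToComp := by
  intro prof _ _
  unfold Spec_profToComp profToComp profToComp_alt
  rw [pv_foldA_eq prof ([], []), pv_main]
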